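-- pv_equiv track=rewrite | github.com/GoekhanDev/blk-index | src/core/blk_parser.py | _bech32_polymod_step
-- ===== SOURCE A (Python) =====
-- from typing import Optional, Union, List, Dict, Any, BinaryIO
--
-- def _bech32_polymod_step(values: List[int]) -> int:
--     """Internal function for bech32 polymod."""
--     GEN = [0x3b6a57b2, 0x26508e6d, 0x1ea119fa, 0x3d4233dd, 0x2a1462b3]
--     chk = 1
--     for value in values:
--         top = chk >> 25
--         chk = (chk & 0x1ffffff) << 5 ^ value
--         for i in range(5):
--             chk ^= GEN[i] if ((top >> i) & 1) else 0
--     return chk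
-- ===== SOURCE B (Python) =====
-- def _bech32_polymod_step(values):
--     """bech32 polymod, with the 5-iteration feedback loop replaced by a
--     32-entry lookup table indexed by the 5 feedback bits."""
--     GEN = [0x3b6a57b2, 0x26508e6d, 0x1ea119fa, 0x3d4233dd, 0x2a1462b3]
--     T = []
--     for x in range(32):
--         t = 0
--         for i in range(5):
--             if (x >> i) & 1:
--                 t ^= GEN[i]
--         T.append(t)
--     chk = 1
--     for value in values:
--         top = chk >> 25
--         chk = (chk & 0x1ffffff) << 5 ^ value ^ T[top % 32]
--     return chk
-- ===== Notes on version B (the rewrite author's own statement) =====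
-- stated objective: faster
-- what changed: The 5-iteration inner feedback loop per value is replaced by a single lookup into a 32-entry table (precomputed once from GEN, indexed by the five top bits top % 32), so the hot loop does one table lookup instead of five conditional xors.
import Mathlib
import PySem

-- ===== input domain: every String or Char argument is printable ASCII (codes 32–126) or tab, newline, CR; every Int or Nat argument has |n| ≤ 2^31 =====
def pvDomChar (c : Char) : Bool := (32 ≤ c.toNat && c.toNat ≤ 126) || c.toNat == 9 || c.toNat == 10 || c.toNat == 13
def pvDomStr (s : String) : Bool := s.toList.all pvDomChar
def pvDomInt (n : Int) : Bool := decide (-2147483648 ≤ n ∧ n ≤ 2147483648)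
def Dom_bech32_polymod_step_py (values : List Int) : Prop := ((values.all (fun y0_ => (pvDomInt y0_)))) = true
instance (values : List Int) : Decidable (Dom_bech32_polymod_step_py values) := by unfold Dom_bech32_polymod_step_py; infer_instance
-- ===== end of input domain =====

-- B replaces the per-value 5-iteration feedback loop with a 32-entry lookup table
-- precomputed from GEN (objective: faster by a constant factor); equality of return
-- values is proved for all integer lists in the domain.


-- ===== PORT A =====
def pvGEN : List Int := [0x3b6a57b2, 0x26508e6d, 0x1ea119fa, 0x3d4233dd, 0x2a1462b3]

-- one iteration of A's outer loop: top = chk >> 25; chk = (chk & 0x1ffffff) << 5 ^ value;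
-- for i in range(5): chk ^= GEN[i] if ((top >> i) & 1) else 0   (GEN[i] lookup always in range)
def pvStepA (chk value : Int) : Int :=
  let top := chk >>> 25
  let chk := PySem.Int.bxor ((PySem.Int.band chk 0x1ffffff) <<< 5) value
  (PySem.List.pyRange 0 5 1).foldl
    (fun chk i =>
      PySem.Int.bxor chk
        (if PySem.Int.band (top >>> i.toNat) 1 ≠ 0 then (PySem.List.pyGet? pvGEN i).getD 0 else 0))
    chk

def bech32_polymod_step_py (values : List Int) : Int :=
  values.foldl pvStepA 1

-- ===== PORT B =====
-- xor of GEN[i] over the bits i set in x (B's table-building inner loop)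
def pvTblEntry (x : Int) : Int :=
  (PySem.List.pyRange 0 5 1).foldl
    (fun t i =>
      if PySem.Int.band (x >>> i.toNat) 1 ≠ 0 then PySem.Int.bxor t ((PySem.List.pyGet? pvGEN i).getD 0) else t)
    0

-- T = [entry for x in range(32)] (B builds it by appending in a loop)
def pvTbl : List Int := (PySem.List.pyRange 0 32 1).map pvTblEntry

-- chk = (chk & 0x1ffffff) << 5 ^ value ^ T[top % 32]   (index always in range 0..31)
def pvStepB (chk value : Int) : Int :=
  let top := chk >>> 25
  PySem.Int.bxor (PySem.Int.bxor ((PySem.Int.band chk 0x1ffffff) <<< 5) value)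
    ((PySem.List.pyGet? pvTbl (PySem.Int.mod top 32)).getD 0)

def bech32_polymod_step_py_alt (values : List Int) : Int :=
  values.foldl pvStepB 1

-- ===== PRECONDITION & SPEC =====
def Spec_bech32_polymod_step_py (values : List Int) (out : Int) : Prop := out = bech32_polymod_step_py_alt values
instance (values : List Int) (out : Int) : Decidable (Spec_bech32_polymod_step_py values out) := by unfold Spec_bech32_polymod_step_py; infer_instance

-- ===== CLAIM (what is proved, stated in full; the proofs are below) =====
def Claim_equal_bech32_polymod_step_py : Prop := ∀ (values : List Int), Dom_bech32_polymod_step_py values → Spec_bech32_polymod_step_py values (bech32_polymod_step_py values)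

-- ===== LEMMAS AND PROOFS =====

-- PySem.Int.bxor agrees with core Int.xor
theorem pv_bxor_eq_xor (a b : Int) : PySem.Int.bxor a b = Int.xor a b := by
  unfold PySem.Int.bxor Int.xor
  cases a <;> cases b <;> simp [Int.negSucc_eq] <;> omega

theorem pv_xor_assoc (a b c : Int) : Int.xor (Int.xor a b) c = Int.xor a (Int.xor b c) := by
  unfold Int.xor
  cases a <;> cases b <;> cases c <;> simp [Nat.xor_assoc]

theorem pv_bxor_assoc (a b c : Int) :
    PySem.Int.bxor (PySem.Int.bxor a b) c = PySem.Int.bxor a (PySem.Int.bxor b c) := by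
  simp [pv_bxor_eq_xor, pv_xor_assoc]

theorem pv_zero_bxor (a : Int) : PySem.Int.bxor 0 a = a := by
  rw [PySem.Int.bxor_comm]; exact PySem.Int.bxor_zero a

-- bit i (i < 5) of top equals bit i of top % 32
theorem pv_bit_eq (top : Int) (i : Nat) (hi : i < 5) :
    PySem.Int.band (top >>> i) 1 = PySem.Int.band ((PySem.Int.mod top 32) >>> i) 1 := by
  rw [PySem.Int.band_one, PySem.Int.band_one,
      PySem.Int.mod_eq_emod_of_pos (a := top) (b := 32) (by norm_num),
      PySem.Int.mod_eq_emod_of_pos (b := 2) (by norm_num),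
      PySem.Int.mod_eq_emod_of_pos (b := 2) (by norm_num),
      Int.shiftRight_eq_div_pow, Int.shiftRight_eq_div_pow]
  interval_cases i <;> norm_num <;> omega

-- the table lookup at an in-range index
theorem pv_tbl_get (r : Int) (h0 : 0 ≤ r) (h32 : r < 32) :
    (PySem.List.pyGet? pvTbl r).getD 0 = pvTblEntry r := by
  interval_cases r <;> rfl

theorem pv_step_eq (chk value : Int) : pvStepA chk value = pvStepB chk value := by
  unfold pvStepA pvStepB
  dsimp only
  rw [pv_tbl_get _ (PySem.Int.mod_nonneg _ (by norm_num)) (PySem.Int.mod_lt _ (by norm_num))]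
  unfold pvTblEntry
  rw [show PySem.List.pyRange 0 5 1 = [0, 1, 2, 3, 4] from rfl]
  simp only [List.foldl, Int.shiftRight_natCast_right,
    show (0:Int).toNat = 0 from rfl, show (1:Int).toNat = 1 from rfl,
    show (2:Int).toNat = 2 from rfl, show (3:Int).toNat = 3 from rfl,
    show (4:Int).toNat = 4 from rfl]
  rw [← pv_bit_eq (chk >>> 25) 0 (by norm_num), ← pv_bit_eq (chk >>> 25) 1 (by norm_num),
      ← pv_bit_eq (chk >>> 25) 2 (by norm_num), ← pv_bit_eq (chk >>> 25) 3 (by norm_num),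
      ← pv_bit_eq (chk >>> 25) 4 (by norm_num)]
  split_ifs <;> simp [pv_bxor_assoc, pv_zero_bxor]

-- ===== VERDICT (by name: the statement is the Claim_ definition above) =====
theorem bech32_polymod_step_py_spec : Claim_equal_bech32_polymod_step_py := by
  intro values _
  unfold Spec_bech32_polymod_step_py bech32_polymod_step_py bech32_polymod_step_py_alt
  have : pvStepA = pvStepB := funext fun c => funext fun v => pv_step_eq c v
  rw [this]
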